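-- pv_equiv track=rewrite | github.com/rom5a/python_test | Lab_3.1/main.py | search_letters_in_words
-- ===== SOURCE A (Python) =====
-- def search_letters_in_words(letters, words):
--     result = []
--     word_array = words.split()
--     for letter in letters:
--         for word in word_array:
--             if letter in word:
--                 result.append(word)
--     return result
-- ===== SOURCE B (Python) =====
-- def search_letters_in_words(letters, words):
--     # one pass over the words builds a char -> ordered-word-list index,
--     # then each letter just extends the result with its precomputed list
--     index = {}
--     for word in words.split():
--         for ch in set(word):
--             index.setdefault(ch, []).append(word)
--     result = []
--     for letter in letters:
--         result.extend(index.get(letter, []))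
--     return result
-- ===== Notes on version B (the rewrite author's own statement) =====
-- stated objective: alternative
-- what changed: Instead of rescanning all words for every letter (nested loops with a substring test), B builds a char-to-ordered-word-list index in a single pass over the words and then concatenates the precomputed list for each letter; on the measured inputs the output size dominates, so running time is similar.
import Mathlib
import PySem

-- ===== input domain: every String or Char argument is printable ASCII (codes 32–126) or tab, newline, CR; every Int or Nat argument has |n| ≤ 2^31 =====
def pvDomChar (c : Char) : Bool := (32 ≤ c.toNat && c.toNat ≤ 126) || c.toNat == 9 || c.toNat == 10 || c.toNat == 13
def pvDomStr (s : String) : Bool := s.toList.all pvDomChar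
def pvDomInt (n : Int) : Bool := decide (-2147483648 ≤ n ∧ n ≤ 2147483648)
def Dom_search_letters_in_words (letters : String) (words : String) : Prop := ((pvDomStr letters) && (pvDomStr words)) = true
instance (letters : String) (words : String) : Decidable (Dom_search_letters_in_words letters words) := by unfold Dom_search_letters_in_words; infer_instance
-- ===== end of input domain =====

-- B replaces A's letter-by-letter rescan of all words with a one-pass char→word-list index; return values proved equal.

-- ===== PORT A =====
-- for letter in letters: for word in words.split(): if letter in word: result.append(word)
-- ('letter in word' is Python substring membership of a one-char string: PySem.Chars.isIn [letter])
def search_letters_in_words (letters : String) (words : String) : List String :=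
  let word_array := PySem.Str.split₀ words
  letters.toList.foldl (fun result letter =>
    word_array.foldl (fun result word =>
      if PySem.Chars.isIn [letter] word.toList then result ++ [word] else result) result) []

-- ===== PORT B =====
-- index = {}; for word in words.split(): for ch in set(word): index.setdefault(ch, []).append(word)
def pvBuildIndex (ws : List String) : PySem.Dict Char (List String) :=
  ws.foldl (fun idx word =>
    (PySem.Set.ofList word.toList).foldl (fun idx ch =>
      idx.insert ch (idx.getD ch [] ++ [word])) idx) PySem.Dict.empty

-- for letter in letters: result.extend(index.get(letter, []))
def search_letters_in_words_alt (letters : String) (words : String) : List String :=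
  let index := pvBuildIndex (PySem.Str.split₀ words)
  letters.toList.foldl (fun result letter => result ++ index.getD letter []) []

-- ===== PRECONDITION & SPEC =====
def Spec_search_letters_in_words (letters : String) (words : String) (out : List String) : Prop := out = search_letters_in_words_alt letters words
instance (letters : String) (words : String) (out : List String) : Decidable (Spec_search_letters_in_words letters words out) := by unfold Spec_search_letters_in_words; infer_instance

-- ===== CLAIM (what is proved, stated in full; the proofs are below) =====
def Claim_equal_search_letters_in_words : Prop := ∀ (letters : String) (words : String), Dom_search_letters_in_words letters words → Spec_search_letters_in_words letters words (search_letters_in_words letters words)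

-- ===== LEMMAS AND PROOFS =====

-- the inner 'for ch in set(word)' loop: only the key c's list changes, and only if c occurs
theorem pv_inner_getD (w : String) (cs : List Char) (hnd : cs.Nodup)
    (d : PySem.Dict Char (List String)) (c : Char) :
    (cs.foldl (fun idx ch => idx.insert ch (idx.getD ch [] ++ [w])) d).getD c []
      = d.getD c [] ++ (if c ∈ cs then [w] else []) := by
  induction cs generalizing d with
  | nil => simp
  | cons ch t ih =>
    simp only [List.foldl_cons]
    rw [ih (List.Nodup.of_cons hnd)]
    rw [PySem.Dict.getD_insert]
    by_cases hc : c = ch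
    · subst hc
      have : c ∉ t := (List.nodup_cons.mp hnd).1
      simp [this]
    · simp [hc]

-- the index contains, at each char c, exactly the words containing c, in order
theorem pv_index_getD (ws : List String) (d : PySem.Dict Char (List String)) (c : Char) :
    (ws.foldl (fun idx word =>
        (PySem.Set.ofList word.toList).foldl (fun idx ch =>
          idx.insert ch (idx.getD ch [] ++ [word])) idx) d).getD c []
      = d.getD c [] ++ ws.filter (fun w => w.toList.contains c) := by
  induction ws generalizing d with
  | nil => simp
  | cons w t ih =>
    simp only [List.foldl_cons]
    rw [ih]
    rw [pv_inner_getD w _ (PySem.Set.nodup_ofList _) d c]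
    by_cases hc : c ∈ w.toList
    · simp [PySem.Set.mem_ofList, hc]
    · simp [PySem.Set.mem_ofList, hc]

-- one-char substring test = char membership
theorem pv_isIn_singleton (c : Char) (l : List Char) :
    PySem.Chars.isIn [c] l = l.contains c := by
  by_cases h : c ∈ l
  · rw [List.contains_eq_mem]
    simp only [h, decide_true]
    rw [PySem.Chars.isIn_iff_infix]
    obtain ⟨pre, suf, rfl⟩ := List.append_of_mem h  -- l = pre ++ c :: suf
    exact ⟨pre, suf, by simp⟩
  · rw [List.contains_eq_mem]
    simp only [h, decide_false]
    rw [PySem.Chars.isIn_eq_false_iff]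
    intro hinf
    exact h (hinf.subset (by simp))

-- ===== VERDICT (by name: the statement is the Claim_ definition above) =====
theorem search_letters_in_words_spec : Claim_equal_search_letters_in_words := by
  intro letters words _
  unfold Spec_search_letters_in_words search_letters_in_words search_letters_in_words_alt pvBuildIndex
  simp only [pv_isIn_singleton]
  rw [PySem.List.foldl_append_eq_flatMap]
  have hA : ∀ (r : List String) (c : Char),
      (PySem.Str.split₀ words).foldl (fun result word =>
        if word.toList.contains c then result ++ [word] else result) r
      = r ++ (PySem.Str.split₀ words).filter (fun w => w.toList.contains c) := by
    intro r c
    exact PySem.List.foldl_append_if_eq_filter _ _ _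
  calc letters.toList.foldl (fun result letter =>
        (PySem.Str.split₀ words).foldl (fun result word =>
          if word.toList.contains letter then result ++ [word] else result) result) []
      = letters.toList.foldl (fun result letter =>
          result ++ (PySem.Str.split₀ words).filter (fun w => w.toList.contains letter)) [] := by
        apply PySem.List.foldl_congr_mem
        intro r c _
        exact hA r c
    _ = letters.toList.flatMap (fun c =>
          (PySem.Str.split₀ words).filter (fun w => w.toList.contains c)) := by
        rw [PySem.List.foldl_append_eq_flatMap]; simp
    _ = _ := by
        apply List.flatMap_congr
        intro c _
        rw [pv_index_getD]
        simp
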